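-- pv_equiv track=rewrite | github.com/pypi-data/pypi-mirror-158 | packages/aliby/aliby-0.1.35.tar.gz/aliby-0.1.35/extraction/core/tracks.py | get_joint_ids
-- ===== SOURCE A (Python) =====
-- def get_joint_ids(merging_seqs) -> dict:
--     """
--     Convert a series of merges into a dictionary where
--     the key is the cell_id of destination and the value a list
--     of the other track ids that were merged into the key
--
--     :param merging_seqs: list of tuples of indices indicating the
--     sequence of merging events. It is important for this to be in sequential order
--
--     How it works:
--
--     The order of merging matters for naming, always the leftmost track will keep the id
--
--     For example, having tracks (a, b, c, d) and the iterations of merge events: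
--
--     0 a b c d
--     1 a b cd
--     2 ab cd
--     3 abcd
--
--     We shold get:
--
--     output {a:a, b:a, c:a, d:a}
--
--     """
--     targets, origins = list(zip(*merging_seqs))
--     static_tracks = set(targets).difference(origins)
--
--     joint = {track_id: track_id for track_id in static_tracks}
--     for target, origin in merging_seqs:
--         joint[origin] = target
--
--     moved_target = [
--         k for k, v in joint.items() if joint[v] != v and v in joint.values()
--     ]
--
--     for orig in moved_target:
--         joint[orig] = rec_bottom(joint, orig)
--
--     return {
--         k: v for k, v in joint.items() if k != v
--     }  # remove ids that point to themselves
--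
-- def rec_bottom(d, k):
--     if d[k] == k:
--         return k
--     else:
--         return rec_bottom(d, d[k])
-- ===== SOURCE B (Python) =====
-- def get_joint_ids(merging_seqs) -> dict:
--     # One pass builds the parent map (last merge wins); an iterative walk
--     # resolves each origin to its root -- no set difference, no values() scan,
--     # no recursion.
--     parent = {}
--     for target, origin in merging_seqs:
--         parent[origin] = target
--
--     def root(x):
--         while parent.get(x, x) != x:
--             x = parent[x]
--         return x
--
--     out = {}
--     for o in parent:
--         r = root(o)
--         if r != o:
--             out[o] = r
--     return out
-- ===== Notes on version B (the rewrite author's own statement) =====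
-- stated objective: faster
-- what changed: B replaces A's set-difference pass, the quadratic moved-target scan (a membership test in joint.values() per key) and the recursive rec_bottom chase with one parent-map building pass plus an iterative root walk per origin.
-- outside the precondition, e.g. on get_joint_ids([]): A raises ValueError, B returns {}
import Mathlib
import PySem

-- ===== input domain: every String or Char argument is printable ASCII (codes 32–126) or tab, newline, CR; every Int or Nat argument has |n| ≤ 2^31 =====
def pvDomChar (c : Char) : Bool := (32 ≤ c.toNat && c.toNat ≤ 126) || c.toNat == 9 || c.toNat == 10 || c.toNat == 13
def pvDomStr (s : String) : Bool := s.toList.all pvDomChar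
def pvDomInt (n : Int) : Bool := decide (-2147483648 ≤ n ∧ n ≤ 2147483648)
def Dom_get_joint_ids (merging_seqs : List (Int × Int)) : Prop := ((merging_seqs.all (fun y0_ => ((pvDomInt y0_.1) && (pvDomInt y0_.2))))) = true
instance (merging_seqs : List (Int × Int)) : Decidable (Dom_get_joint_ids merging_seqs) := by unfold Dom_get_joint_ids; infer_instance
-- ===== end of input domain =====

-- B replaces A's set-difference pass, quadratic moved-target scan and recursive
-- bottom-chasing by one parent-map building pass plus an iterative root walk per origin.


-- ===== PORT A =====
-- rec_bottom is Python recursion with no structural measure; the caller passes fuel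
-- merging_seqs.length + 1, which suffices on every input admitted by Pre_ (chains reach
-- their fixpoint within the list's length).  d[k] is ported as getD k k: exact here,
-- because every value stored in `joint` is itself a key of `joint`.
def rec_bottom (fuel : Nat) (d : PySem.Dict Int Int) (k : Int) : Int :=
  match fuel with
  | 0 => k
  | f + 1 => if d.getD k k = k then k else rec_bottom f d (d.getD k k)

def get_joint_ids (merging_seqs : List (Int × Int)) : List (Int × Int) :=
  -- targets, origins = list(zip(*merging_seqs))  (raises on [] — excluded by Pre_)
  let targets := merging_seqs.map (·.1)
  let origins := merging_seqs.map (·.2)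
  let static_tracks : PySem.Set Int := PySem.Set.diff (PySem.Set.ofList targets) origins
  -- the final result does not depend on the (unmodelled) Python set iteration order:
  -- every static entry maps to itself and is filtered out at the end
  let joint0 : PySem.Dict Int Int :=
    static_tracks.foldl (fun d t => d.insert t t) PySem.Dict.empty
  let joint1 := merging_seqs.foldl (fun d p => d.insert p.2 p.1) joint0
  let moved_target :=
    (joint1.items.filter (fun kv =>
      decide (joint1.getD kv.2 kv.2 ≠ kv.2) && decide (kv.2 ∈ joint1.values))).map (·.1)
  let joint2 := moved_target.foldl
    (fun d k => d.insert k (rec_bottom (merging_seqs.length + 1) d k)) joint1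
  joint2.items.filter (fun kv => decide (kv.1 ≠ kv.2))

-- ===== PORT B =====
-- the Python while-loop `while parent.get(x, x) != x: x = parent[x]`; fuel
-- merging_seqs.length + 1 suffices on every input admitted by Pre_
def walk_root (fuel : Nat) (parent : PySem.Dict Int Int) (x : Int) : Int :=
  match fuel with
  | 0 => x
  | f + 1 => if parent.getD x x = x then x else walk_root f parent (parent.getD x x)

def get_joint_ids_alt (merging_seqs : List (Int × Int)) : List (Int × Int) :=
  let parent := merging_seqs.foldl (fun d p => d.insert p.2 p.1) PySem.Dict.empty
  let out := parent.keys.foldl (fun out o =>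
    let r := walk_root (merging_seqs.length + 1) parent o
    if r = o then out else out.insert o r) PySem.Dict.empty
  out.items

-- ===== PRECONDITION & SPEC =====
-- pstep ms x = the id x is merged into on the LAST merge naming it as origin (x itself if none)
def pstep (merging_seqs : List (Int × Int)) (x : Int) : Int :=
  (merging_seqs.foldl (fun d p => d.insert p.2 p.1)
    (PySem.Dict.empty : PySem.Dict Int Int)).getD x x

-- Pre_ excludes exactly the inputs on which Python A raises: the empty list
-- (ValueError from zip(*[])) and merge sequences whose last-merge pointer graph has a
-- cycle, on which rec_bottom recurses forever (RecursionError).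
def Pre_get_joint_ids (merging_seqs : List (Int × Int)) : Prop :=
  merging_seqs ≠ [] ∧
    ∀ p ∈ merging_seqs,
      pstep merging_seqs ((pstep merging_seqs)^[merging_seqs.length] p.2)
        = (pstep merging_seqs)^[merging_seqs.length] p.2

instance (merging_seqs : List (Int × Int)) : Decidable (Pre_get_joint_ids merging_seqs) := by
  unfold Pre_get_joint_ids; infer_instance

def pvWitness_get_joint_ids : (List (Int × Int)) := ([(1, 2), (1, 3), (3, 4)])

def Spec_get_joint_ids (merging_seqs : List (Int × Int)) (out : List (Int × Int)) : Prop := out = get_joint_ids_alt merging_seqs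
instance (merging_seqs : List (Int × Int)) (out : List (Int × Int)) : Decidable (Spec_get_joint_ids merging_seqs out) := by unfold Spec_get_joint_ids; infer_instance

-- ===== CLAIM (what is proved, stated in full; the proofs are below) =====
def Claim_equal_get_joint_ids : Prop := ∀ (merging_seqs : List (Int × Int)), Dom_get_joint_ids merging_seqs → Pre_get_joint_ids merging_seqs → Spec_get_joint_ids merging_seqs (get_joint_ids merging_seqs)

-- ===== LEMMAS AND PROOFS =====

-- the two fuelled chain-walkers are the same function
theorem rec_bottom_eq_walk_root (fuel : Nat) (d : PySem.Dict Int Int) (k : Int) :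
    rec_bottom fuel d k = walk_root fuel d k := by
  induction fuel generalizing k with
  | zero => rfl
  | succ f ih => simp only [rec_bottom, walk_root, ih]


theorem getD_foldl_pairs (l : List (Int × Int)) (d : PySem.Dict Int Int) (x dflt : Int) :
    (l.foldl (fun d p => d.insert p.2 p.1) d).getD x dflt
      = ((l.reverse.find? (fun p => p.2 == x)).map (·.1)).getD (d.getD x dflt) := by
  induction l generalizing d with
  | nil => simp
  | cons p tl ih =>
    simp only [List.foldl_cons, ih, List.reverse_cons, List.find?_append]
    cases h : tl.reverse.find? (fun p => p.2 == x) with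
    | some q => simp
    | none =>
      simp only [Option.none_or]
      by_cases hx : p.2 = x
      · subst hx; simp
      · have hb : (p.2 == x) = false := by simp [hx]
        simp [List.find?, hb, PySem.Dict.getD_insert, Ne.symm hx]

theorem getD_foldl_self (l : List Int) (d : PySem.Dict Int Int) (x dflt : Int) :
    (l.foldl (fun d t => d.insert t t) d).getD x dflt
      = if x ∈ l then x else d.getD x dflt := by
  induction l generalizing d with
  | nil => simp
  | cons t tl ih =>
    simp only [List.foldl_cons, ih, PySem.Dict.getD_insert, List.mem_cons]
    by_cases h1 : x ∈ tl <;> by_cases h2 : x = t <;> simp [h1, h2]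

theorem update_eq_append_ofList (xs : List Int) (s t : List Int) (h : ∀ x ∈ xs, x ∉ s) :
    PySem.Set.update (s ++ t) xs = s ++ PySem.Set.update t xs := by
  induction xs generalizing t with
  | nil => rfl
  | cons x tl ih =>
    show PySem.Set.update (PySem.Set.add (s ++ t) x) tl = s ++ PySem.Set.update (PySem.Set.add t x) tl
    have hxs : x ∉ s := h x (by simp)
    have hadd : PySem.Set.add (s ++ t) x = s ++ PySem.Set.add t x := by
      by_cases hxt : x ∈ t
      · rw [PySem.Set.add_of_mem hxt, PySem.Set.add_of_mem (by simp [hxt])]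
      · rw [PySem.Set.add_of_not_mem hxt, PySem.Set.add_of_not_mem (by simp [hxs, hxt]),
          List.append_assoc]
    rw [hadd, ih _ (fun y hy => h y (by simp [hy]))]

theorem update_eq_self (xs : List Int) (s : List Int) (h : ∀ x ∈ xs, x ∈ s) :
    PySem.Set.update s xs = s := by
  induction xs with
  | nil => rfl
  | cons x tl ih =>
    show PySem.Set.update (PySem.Set.add s x) tl = s
    rw [PySem.Set.add_of_mem (h x (by simp))]
    exact ih (fun y hy => h y (by simp [hy]))

-- root of x in the last-merge pointer graph (proof-side notion)
def proot (ms : List (Int × Int)) (x : Int) : Int := (pstep ms)^[ms.length] x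

theorem proot_fixed (ms : List (Int × Int)) {x : Int} (h : pstep ms x = x) : proot ms x = x :=
  Function.iterate_fixed h _

theorem proot_pstep (ms : List (Int × Int))
    (hR1 : ∀ x, pstep ms (proot ms x) = proot ms x) (x : Int) :
    proot ms (pstep ms x) = proot ms x := by
  show (pstep ms)^[ms.length] (pstep ms x) = _
  rw [← Function.iterate_succ_apply, Function.iterate_succ_apply']
  exact hR1 x

theorem rec_bottom_root (ms : List (Int × Int))
    (hR1 : ∀ x, pstep ms (proot ms x) = proot ms x)
    (d : PySem.Dict Int Int)
    (hInv : ∀ x, d.getD x x = pstep ms x ∨ d.getD x x = proot ms x) :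
    ∀ (fuel m : Nat) (x : Int),
      pstep ms ((pstep ms)^[m] x) = (pstep ms)^[m] x → m < fuel →
      rec_bottom fuel d x = proot ms x := by
  intro fuel
  induction fuel with
  | zero => intro m x _ h; omega
  | succ f ih =>
    intro m x hfx hlt
    simp only [rec_bottom]
    by_cases hy : d.getD x x = x
    · simp only [hy]
      rcases hInv x with h | h
      · rw [hy] at h; exact (proot_fixed ms h.symm).symm
      · rw [hy] at h; exact h
    · rw [if_neg hy]
      have hgx : pstep ms x ≠ x ∨ d.getD x x = proot ms x := by
        rcases hInv x with h | h
        · left; rw [← h]; exact hy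
        · right; exact h
      rcases hInv x with h | h
      · -- d.getD x x = pstep ms x, one real step
        have hpx : pstep ms x ≠ x := by rw [← h]; exact hy
        have hm : m ≠ 0 := by
          intro h0; subst h0; simp at hfx; exact hpx hfx
        obtain ⟨m', rfl⟩ : ∃ m', m = m' + 1 := ⟨m - 1, by omega⟩
        rw [h]
        have hfx' : pstep ms ((pstep ms)^[m'] (pstep ms x)) = (pstep ms)^[m'] (pstep ms x) := by
          rw [← Function.iterate_succ_apply]; exact hfx
        rw [ih m' (pstep ms x) hfx' (by omega)]
        exact proot_pstep ms hR1 x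
      · -- d.getD x x = proot ms x (already compressed)
        rw [h]
        have hrx : proot ms x ≠ x := by rw [← h]; exact hy
        have hm : m ≠ 0 := by
          intro h0; subst h0
          simp only [Function.iterate_zero, id] at hfx
          exact hrx (proot_fixed ms hfx)
        have hf : 1 ≤ f := by omega
        rw [ih 0 (proot ms x) (by simpa using hR1 x) (by omega)]
        exact proot_fixed ms (hR1 x)

theorem foldl_compress (ms : List (Int × Int))
    (hR1 : ∀ x, pstep ms (proot ms x) = proot ms x) :
    ∀ (l : List Int) (d : PySem.Dict Int Int),
      (∀ x, d.getD x x = pstep ms x ∨ d.getD x x = proot ms x) →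
      ∀ x, ((l.foldl (fun d k => d.insert k (rec_bottom (ms.length + 1) d k)) d).getD x 0)
        = if x ∈ l then proot ms x else d.getD x 0 := by
  intro l
  induction l with
  | nil => intro d _ x; simp
  | cons k tl ih =>
    intro d hInv x
    have hrb : rec_bottom (ms.length + 1) d k = proot ms k :=
      rec_bottom_root ms hR1 d hInv (ms.length + 1) ms.length k (hR1 k) (by omega)
    simp only [List.foldl_cons, hrb]
    have hInv' : ∀ y, (d.insert k (proot ms k)).getD y y = pstep ms y ∨
        (d.insert k (proot ms k)).getD y y = proot ms y := by
      intro y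
      rw [PySem.Dict.getD_insert]
      by_cases hyk : y = k
      · subst hyk; simp
      · rw [if_neg hyk]; exact hInv y
    rw [ih _ hInv' x]
    by_cases h1 : x ∈ tl <;> by_cases h2 : x = k <;>
      simp [h1, h2, PySem.Dict.getD_insert]

theorem foldl_out (w : Int → Int) :
    ∀ (l : List Int) (acc : PySem.Dict Int Int), l.Nodup →
      (∀ o ∈ l, acc.contains o = false) →
      (l.foldl (fun out o => let r := w o; if r = o then out else out.insert o r) acc).items
        = acc.items ++ (l.filter (fun o => !(decide (w o = o)))).map (fun o => (o, w o)) := by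
  intro l
  induction l with
  | nil => intro acc _ _; simp
  | cons o tl ih =>
    intro acc hnd hfresh
    have hzeta : (fun (out : PySem.Dict Int Int) o => let r := w o; if r = o then out else out.insert o r)
        = (fun out o => if w o = o then out else out.insert o (w o)) := rfl
    rw [hzeta] at ih ⊢
    simp only [List.foldl_cons, List.filter_cons]
    by_cases hw : w o = o
    · rw [if_pos hw, ih acc hnd.of_cons (fun y hy => hfresh y (by simp [hy]))]
      simp [hw]
    · rw [if_neg hw]
      rw [ih (acc.insert o (w o)) hnd.of_cons ?_]
      · rw [PySem.Dict.items_insert_of_not_contains _ _ (hfresh o (by simp))]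
        simp [hw]
      · intro y hy
        rw [PySem.Dict.contains_insert]
        have : y ≠ o := by rintro rfl; exact (List.nodup_cons.mp hnd).1 hy
        simp [this, hfresh y (by simp [hy])]

theorem pstep_not_mem (ms : List (Int × Int)) (x : Int) (hx : x ∉ ms.map (·.2)) :
    pstep ms x = x := by
  rw [pstep, getD_foldl_pairs]
  have hf : ms.reverse.find? (fun p => p.2 == x) = none := by
    rw [List.find?_eq_none]
    intro p hp
    simp only [beq_iff_eq]
    exact fun h => hx (List.mem_map.mpr ⟨p, List.mem_reverse.mp hp, h⟩)
  simp [hf, PySem.Dict.getD_empty]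

-- the common normal form both ports are proved equal to
def normRes (ms : List (Int × Int)) : List (Int × Int) :=
  ((PySem.Set.ofList (ms.map (·.2))).filter (fun o => !(decide (proot ms o = o)))).map
    (fun o => (o, proot ms o))

theorem hR1_of_pre (ms : List (Int × Int))
    (hfix : ∀ p ∈ ms, pstep ms ((pstep ms)^[ms.length] p.2) = (pstep ms)^[ms.length] p.2) :
    ∀ x, pstep ms (proot ms x) = proot ms x := by
  intro x
  by_cases hx : x ∈ ms.map (·.2)
  · obtain ⟨p, hp, hp2⟩ := List.mem_map.mp hx
    rw [show x = p.2 from hp2.symm]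
    exact hfix p hp
  · have hgx : pstep ms x = x := pstep_not_mem ms x hx
    rw [proot_fixed ms hgx, hgx]

theorem alt_char (ms : List (Int × Int))
    (hR1 : ∀ x, pstep ms (proot ms x) = proot ms x) :
    get_joint_ids_alt ms = normRes ms := by
  have hw : ∀ x, walk_root (ms.length + 1) (ms.foldl (fun d p => d.insert p.2 p.1)
      (PySem.Dict.empty : PySem.Dict Int Int)) x = proot ms x := by
    intro x
    rw [← rec_bottom_eq_walk_root]
    exact rec_bottom_root ms hR1 _ (fun y => Or.inl rfl) (ms.length + 1) ms.length x (hR1 x)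
      (by omega)
  have hkeys : (ms.foldl (fun d p => d.insert p.2 p.1)
      (PySem.Dict.empty : PySem.Dict Int Int)).keys = PySem.Set.ofList (ms.map (·.2)) := by
    have := PySem.Dict.keys_foldl_insert_key (ν := Int) ms (fun p => p.2) (fun _ p => p.1)
      PySem.Dict.empty
    simpa [PySem.Dict.keys_empty] using this
  show (_ : PySem.Dict Int Int).items = _
  rw [hkeys]
  rw [foldl_out _ _ _ (PySem.Set.nodup_ofList _) (fun o _ => PySem.Dict.contains_empty o)]
  simp only [normRes]
  rw [List.filter_congr (fun o _ => by rw [hw]), List.map_congr_left (fun o _ => by rw [hw])]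
  rw [show (PySem.Dict.empty : PySem.Dict Int Int).items = [] from rfl, List.nil_append]
theorem a_char (ms : List (Int × Int))
    (hR1 : ∀ x, pstep ms (proot ms x) = proot ms x) :
    get_joint_ids ms = normRes ms := by
  simp only [get_joint_ids]
  -- abbreviations
  set origins := ms.map (·.2) with horig
  set targets := ms.map (·.1) with htarg
  set static := PySem.Set.diff (PySem.Set.ofList targets) origins with hstat
  set joint0 := static.foldl (fun d t => d.insert t t) (PySem.Dict.empty : PySem.Dict Int Int) with hj0
  set joint1 := ms.foldl (fun d p => d.insert p.2 p.1) joint0 with hj1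
  have hstat_not_orig : ∀ s ∈ static, s ∉ origins := by
    intro s hs
    exact ((PySem.Set.mem_diff _ _ _).mp hs).2
  have hdisj : ∀ x ∈ origins, x ∉ static := fun x hx hs => hstat_not_orig x hs hx
  have hstatic_nodup : static.Nodup := PySem.Set.nodup_diff _ _ (PySem.Set.nodup_ofList _)
  have hkeys0 : joint0.keys = static := by
    have h := PySem.Dict.keys_foldl_insert (ν := Int) static (fun _ t => t) PySem.Dict.empty
    rw [hj0]
    have h2 : PySem.Set.update ([] : List Int) static = static := by
      have h3 : PySem.Set.update ([] : List Int) static = PySem.Set.ofList static := rfl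
      rw [h3, PySem.Set.ofList_eq_self_of_nodup _ hstatic_nodup]
    rw [show (fun (d : PySem.Dict Int Int) (t : Int) => d.insert t t)
        = (fun (d : PySem.Dict Int Int) (x : Int) => d.insert x ((fun _ x => x) d x)) from rfl]
    rw [h, PySem.Dict.keys_empty, h2]
  have hkeys1 : joint1.keys = static ++ PySem.Set.ofList origins := by
    have h := PySem.Dict.keys_foldl_insert_key (ν := Int) ms (fun p => p.2) (fun _ p => p.1) joint0
    rw [hj1]
    rw [show (fun (d : PySem.Dict Int Int) (p : Int × Int) => d.insert p.2 p.1)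
        = (fun (d : PySem.Dict Int Int) (p : Int × Int) => d.insert p.2 ((fun _ p => p.1) d p)) from rfl]
    rw [h, hkeys0]
    have h2 := update_eq_append_ofList origins static [] hdisj
    rw [List.append_nil] at h2
    rw [h2]
    rfl
  have hnodup1 : (static ++ PySem.Set.ofList origins).Nodup := by
    exact hstatic_nodup.append (PySem.Set.nodup_ofList _)
      (fun a ha hb => hstat_not_orig a ha ((PySem.Set.mem_ofList _ a).mp hb))
  have hval : ∀ k, k ∈ static ∨ k ∈ origins → joint1.getD k 0 = pstep ms k := by
    intro k hk
    rw [hj1, getD_foldl_pairs, pstep, getD_foldl_pairs]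
    cases hf : ms.reverse.find? (fun p => p.2 == k) with
    | some q => simp
    | none =>
      have hko : k ∉ origins := by
        intro hk2
        obtain ⟨p, hp, hp2⟩ := List.mem_map.mp hk2
        have := List.find?_eq_none.mp hf p (List.mem_reverse.mpr hp)
        simp [hp2] at this
      have hks : k ∈ static := hk.resolve_right hko
      simp [hj0, getD_foldl_self, hks, PySem.Dict.getD_empty]
  have hstep1 : ∀ y, joint1.getD y y = pstep ms y := by
    intro y
    rw [hj1, getD_foldl_pairs, pstep, getD_foldl_pairs]
    cases hf : ms.reverse.find? (fun p => p.2 == y) with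
    | some q => simp
    | none => simp [hj0, getD_foldl_self, PySem.Dict.getD_empty]
  have hitems1 : joint1.items
      = (static ++ PySem.Set.ofList origins).map (fun k => (k, joint1.getD k 0)) := by
    rw [← hkeys1]
    exact PySem.Dict.items_eq_map_keys joint1 (hkeys1 ▸ hnodup1) 0
  have hmoved : (List.map (fun x => x.1)
      (List.filter (fun kv => decide (joint1.getD kv.2 kv.2 ≠ kv.2) && decide (kv.2 ∈ joint1.values))
        joint1.items))
      = (PySem.Set.ofList origins).filter (fun o => decide (pstep ms (pstep ms o) ≠ pstep ms o)) := by
    rw [hitems1, List.filter_map, List.map_map]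
    have hcomp : ∀ k ∈ static ++ PySem.Set.ofList origins,
        ((fun kv => decide (joint1.getD kv.2 kv.2 ≠ kv.2) && decide (kv.2 ∈ joint1.values)) ∘
          (fun k => (k, joint1.getD k 0))) k
          = decide (pstep ms (pstep ms k) ≠ pstep ms k) := by
      intro k hk
      have hvk : joint1.getD k 0 = pstep ms k := by
        apply hval
        rcases List.mem_append.mp hk with h | h
        · exact Or.inl h
        · exact Or.inr ((PySem.Set.mem_ofList _ _).mp h)
      have hmem : pstep ms k ∈ joint1.values := by
        rw [PySem.Dict.values_eq_map_keys joint1 (hkeys1 ▸ hnodup1) 0, hkeys1]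
        exact List.mem_map.mpr ⟨k, hk, hvk⟩
      simp only [Function.comp_apply, hvk, hstep1, hmem, decide_true, Bool.and_true]
    rw [List.filter_congr hcomp]
    have hcompid : ((fun (x : Int × Int) => x.1) ∘ (fun k => (k, joint1.getD k 0)))
        = (fun k => k) := rfl
    rw [hcompid, List.map_id', List.filter_append]
    have hstatnil : static.filter (fun o => decide (pstep ms (pstep ms o) ≠ pstep ms o)) = [] := by
      apply List.filter_eq_nil_iff.mpr
      intro s hs
      have h := pstep_not_mem ms s (hstat_not_orig s hs)
      simp [h]
    rw [hstatnil, List.nil_append]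
  rw [hmoved]
  set moved := (PySem.Set.ofList origins).filter
    (fun o => decide (pstep ms (pstep ms o) ≠ pstep ms o)) with hmv
  set joint2 := moved.foldl (fun d k => d.insert k (rec_bottom (ms.length + 1) d k)) joint1 with hj2
  have hInv1 : ∀ x, joint1.getD x x = pstep ms x ∨ joint1.getD x x = proot ms x :=
    fun x => Or.inl (hstep1 x)
  have hg2 : ∀ x, joint2.getD x 0 = if x ∈ moved then proot ms x else joint1.getD x 0 :=
    foldl_compress ms hR1 moved joint1 hInv1
  have hkeys2 : joint2.keys = static ++ PySem.Set.ofList origins := by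
    have h := PySem.Dict.keys_foldl_insert (ν := Int) moved
      (fun d k => rec_bottom (ms.length + 1) d k) joint1
    rw [hj2]
    rw [show (fun (d : PySem.Dict Int Int) (k : Int) => d.insert k (rec_bottom (ms.length + 1) d k))
        = (fun (d : PySem.Dict Int Int) (x : Int) =>
            d.insert x ((fun d k => rec_bottom (ms.length + 1) d k) d x)) from rfl]
    rw [h, hkeys1]
    apply update_eq_self
    intro o ho
    exact List.mem_append_right _ (List.mem_of_mem_filter ho)
  have hitems2 : joint2.items
      = (static ++ PySem.Set.ofList origins).map (fun k => (k, joint2.getD k 0)) := by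
    rw [← hkeys2]
    exact PySem.Dict.items_eq_map_keys joint2 (hkeys2 ▸ hnodup1) 0
  have hval2s : ∀ s ∈ static, joint2.getD s 0 = s := by
    intro s hs
    have hsm : s ∉ moved := by
      intro hm
      exact hstat_not_orig s hs ((PySem.Set.mem_ofList _ _).mp (List.mem_of_mem_filter hm))
    rw [hg2, if_neg hsm, hval s (Or.inl hs), pstep_not_mem ms s (hstat_not_orig s hs)]
  have hval2o : ∀ o ∈ PySem.Set.ofList origins, joint2.getD o 0 = proot ms o := by
    intro o ho
    rw [hg2]
    by_cases hm : o ∈ moved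
    · rw [if_pos hm]
    · rw [if_neg hm, hval o (Or.inr ((PySem.Set.mem_ofList _ _).mp ho))]
      have hfix2 : pstep ms (pstep ms o) = pstep ms o := by
        by_contra hne
        exact hm (List.mem_filter.mpr ⟨ho, by simpa using hne⟩)
      rw [← proot_pstep ms hR1 o, proot_fixed ms hfix2]
  rw [hitems2, List.filter_map]
  rw [List.filter_append]
  have h1 : static.filter ((fun (kv : Int × Int) => decide (kv.1 ≠ kv.2)) ∘ (fun k => (k, joint2.getD k 0))) = [] := by
    apply List.filter_eq_nil_iff.mpr
    intro s hs
    simp [hval2s s hs]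
  rw [h1, List.nil_append]
  have h2 : (PySem.Set.ofList origins).filter
      ((fun (kv : Int × Int) => decide (kv.1 ≠ kv.2)) ∘ (fun k => (k, joint2.getD k 0)))
      = (PySem.Set.ofList origins).filter (fun o => !(decide (proot ms o = o))) := by
    apply List.filter_congr
    intro o ho
    simp only [Function.comp_apply, hval2o o ho]
    by_cases h : proot ms o = o
    · simp [h]
    · simp [h, Ne.symm h]
  rw [h2]
  apply List.map_congr_left
  intro o ho
  have := hval2o o (List.mem_of_mem_filter ho)
  simp [this]

-- ===== VERDICT (by name: the statement is the Claim_ definition above) =====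
theorem get_joint_ids_spec : Claim_equal_get_joint_ids := by
  intro ms _ hpre
  unfold Spec_get_joint_ids
  have hR1 := hR1_of_pre ms hpre.2
  rw [a_char ms hR1, alt_char ms hR1]
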